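-- pv_equiv track=rewrite | github.com/roctbb/ai-game-engine | games/jump_gem_duel/engine.py | _placements
-- ===== SOURCE A (Python) =====
-- _SLOTS = ("amber", "teal")
--
-- def _placements(role_team: dict[str, str], slot_scores: dict[str, int]) -> dict[str, int]:
--     ordered = sorted(_SLOTS, key=lambda slot: slot_scores[slot], reverse=True)
--     result: dict[str, int] = {}
--     last_score: int | None = None
--     last_place = 0
--     for index, slot in enumerate(ordered, start=1):
--         score = slot_scores[slot]
--         if score != last_score:
--             last_place = index
--             last_score = score
--         result[role_team[slot]] = last_place
--     return result
-- ===== SOURCE B (Python) =====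
-- _SLOTS = ("amber", "teal")
--
-- def _placements(role_team: dict[str, str], slot_scores: dict[str, int]) -> dict[str, int]:
--     # Two fixed slots: compare the two scores directly instead of sorting and
--     # tracking ties.  Entries are written in descending-score order (amber first
--     # on ties), so a shared team key keeps last-writer-wins behaviour.
--     a = slot_scores["amber"]
--     t = slot_scores["teal"]
--     ta = role_team["amber"]
--     tt = role_team["teal"]
--     if a == t:
--         result = {ta: 1}
--         result[tt] = 1
--     elif a > t:
--         result = {ta: 1}
--         result[tt] = 2
--     else:
--         result = {tt: 1}
--         result[ta] = 2
--     return result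
-- ===== Notes on version B (the rewrite author's own statement) =====
-- stated objective: simpler
-- what changed: Replaces the sort + tie-tracking enumerate loop over the slot tuple with a direct three-way comparison of the two scores, writing the result entries in descending-score order (amber first on ties).
import Mathlib
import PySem

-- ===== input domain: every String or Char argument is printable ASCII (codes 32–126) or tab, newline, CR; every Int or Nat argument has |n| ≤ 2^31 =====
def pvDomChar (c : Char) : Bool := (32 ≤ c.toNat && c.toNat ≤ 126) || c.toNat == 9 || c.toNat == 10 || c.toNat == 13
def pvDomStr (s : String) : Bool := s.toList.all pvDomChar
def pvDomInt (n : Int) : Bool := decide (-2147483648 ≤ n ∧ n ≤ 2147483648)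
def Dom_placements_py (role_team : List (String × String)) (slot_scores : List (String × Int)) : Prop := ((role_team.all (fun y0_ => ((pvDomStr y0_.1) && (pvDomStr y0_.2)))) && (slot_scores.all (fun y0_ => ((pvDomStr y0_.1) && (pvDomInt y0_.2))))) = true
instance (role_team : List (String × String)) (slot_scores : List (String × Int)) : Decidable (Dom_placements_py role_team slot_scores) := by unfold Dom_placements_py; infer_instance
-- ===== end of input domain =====

-- B replaces A's sort + tie-tracking loop by a direct comparison of the two scores (objective: simpler).
-- Both ports look keys up with `.getD`; Pre_ guarantees all four keys are present, so the defaults are never used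
-- (Python raises KeyError exactly on the inputs Pre_ excludes).

-- ===== PORT A =====
-- literal port of A: sort the slot tuple by score (reverse), then the enumerate loop with
-- state (result dict, last_score : Option Int, last_place)
def placements_py (role_team : List (String × String)) (slot_scores : List (String × Int)) : List (String × Int) :=
  let score := fun (slot : String) => ((PySem.Dict.mk slot_scores).get? slot).getD 0
  let ordered := PySem.List.sorted ["amber", "teal"] score true
  let final := (PySem.List.enumerate ordered 1).foldl
    (fun (st : PySem.Dict String Int × Option Int × Int) (p : Int × String) =>
      let result := st.1
      let last_score := st.2.1
      let last_place := st.2.2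
      let s := score p.2
      let (last_place, last_score) :=
        if (some s == last_score) then (last_place, last_score) else (p.1, some s)
      (result.insert (((PySem.Dict.mk role_team).get? p.2).getD "") last_place, last_score, last_place))
    (PySem.Dict.empty, none, 0)
  final.1.items

-- ===== PORT B =====
def placements_py_alt (role_team : List (String × String)) (slot_scores : List (String × Int)) : List (String × Int) :=
  let a := ((PySem.Dict.mk slot_scores).get? "amber").getD 0
  let t := ((PySem.Dict.mk slot_scores).get? "teal").getD 0
  let ta := ((PySem.Dict.mk role_team).get? "amber").getD ""
  let tt := ((PySem.Dict.mk role_team).get? "teal").getD ""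
  if a = t then ((PySem.Dict.empty.insert ta 1).insert tt 1).items
  else if a > t then ((PySem.Dict.empty.insert ta 1).insert tt 2).items
  else ((PySem.Dict.empty.insert tt 1).insert ta 2).items

-- ===== PRECONDITION & SPEC =====
-- Pre_ = exactly the inputs where Python A returns: both dicts contain both slot keys (else KeyError).
def Pre_placements_py (role_team : List (String × String)) (slot_scores : List (String × Int)) : Prop :=
  (PySem.Dict.mk slot_scores).contains "amber" = true ∧ (PySem.Dict.mk slot_scores).contains "teal" = true ∧
  (PySem.Dict.mk role_team).contains "amber" = true ∧ (PySem.Dict.mk role_team).contains "teal" = true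
instance (role_team : List (String × String)) (slot_scores : List (String × Int)) : Decidable (Pre_placements_py role_team slot_scores) := by unfold Pre_placements_py; infer_instance
def pvWitness_placements_py : (List (String × String)) × (List (String × Int)) :=
  ([("amber", "X"), ("teal", "Y")], [("amber", 3), ("teal", 1)])
def Spec_placements_py (role_team : List (String × String)) (slot_scores : List (String × Int)) (out : List (String × Int)) : Prop := out = placements_py_alt role_team slot_scores
instance (role_team : List (String × String)) (slot_scores : List (String × Int)) (out : List (String × Int)) : Decidable (Spec_placements_py role_team slot_scores out) := by unfold Spec_placements_py; infer_instance

-- ===== CLAIM (what is proved, stated in full; the proofs are below) =====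
def Claim_equal_placements_py : Prop := ∀ (role_team : List (String × String)) (slot_scores : List (String × Int)), Dom_placements_py role_team slot_scores → Pre_placements_py role_team slot_scores → Spec_placements_py role_team slot_scores (placements_py role_team slot_scores)

-- ===== LEMMAS AND PROOFS =====

-- the reverse sort of the two-slot list, named by the score comparison
theorem sorted_two_ge {key : String → Int} (h : key "teal" ≤ key "amber") :
    PySem.List.sorted ["amber", "teal"] key true = ["amber", "teal"] := by
  apply PySem.List.sorted_rev_eq_self_of_pairwise
  simp [h]

theorem sorted_two_lt {key : String → Int} (h : key "amber" < key "teal") :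
    PySem.List.sorted ["amber", "teal"] key true = ["teal", "amber"] := by
  apply PySem.List.sorted_rev_eq_of_perm_of_pairwise_gt
  · exact List.Perm.swap _ _ _
  · simp [h]

-- ===== VERDICT (by name: the statement is the Claim_ definition above) =====
theorem placements_py_spec : Claim_equal_placements_py := by
  intro role_team slot_scores _ _
  simp only [Spec_placements_py, placements_py, placements_py_alt]
  set a := ((PySem.Dict.mk slot_scores).get? "amber").getD 0 with ha
  set t := ((PySem.Dict.mk slot_scores).get? "teal").getD 0 with ht
  rcases lt_trichotomy a t with hlt | heq | hgt
  · rw [sorted_two_lt (by simpa [← ha, ← ht] using hlt)]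
    simp [PySem.List.enumerate, List.foldl, ← ha, ← ht, hlt.ne, lt_asymm hlt]
  · rw [sorted_two_ge (by simp [← ha, ← ht, heq])]
    simp [PySem.List.enumerate, List.foldl, ← ha, ← ht, heq]
  · rw [sorted_two_ge (by simpa [← ha, ← ht] using hgt.le)]
    simp [PySem.List.enumerate, List.foldl, ← ha, ← ht, hgt.ne', hgt.ne, hgt]
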